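-- pv_equiv track=rewrite | github.com/cxychristyyyyyy/information-retrieval | proj1.py | getSplitWords
-- ===== SOURCE A (Python) =====
-- import string
-- import string
--
-- def getSplitWords(words):
--
--     # Split words string and remove special characters
--     if words is not None:
--         words.replace(string.punctuation, ' ')
--         punctuation_string = string.punctuation
--         for i in punctuation_string:
--             words = words.replace(i, ' ')
--         words = words.split()
--
--     return words
-- ===== SOURCE B (Python) =====
-- import string
--
-- def getSplitWords(words):
--     # Single-pass tokenizer: split on punctuation or whitespace, skipping empty tokens.
--     if words is None:
--         return None
--     delims = set(string.punctuation)
--     result = []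
--     cur = []
--     for c in words:
--         if c in delims or c.isspace():
--             if cur:
--                 result.append(''.join(cur))
--                 cur = []
--         else:
--             cur.append(c)
--     if cur:
--         result.append(''.join(cur))
--     return result
-- ===== Notes on version B (the rewrite author's own statement) =====
-- stated objective: alternative
-- what changed: B tokenizes in a single pass over the characters with a delimiter set (punctuation or whitespace), instead of A's 32 successive full-string replace passes followed by split().
import Mathlib
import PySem

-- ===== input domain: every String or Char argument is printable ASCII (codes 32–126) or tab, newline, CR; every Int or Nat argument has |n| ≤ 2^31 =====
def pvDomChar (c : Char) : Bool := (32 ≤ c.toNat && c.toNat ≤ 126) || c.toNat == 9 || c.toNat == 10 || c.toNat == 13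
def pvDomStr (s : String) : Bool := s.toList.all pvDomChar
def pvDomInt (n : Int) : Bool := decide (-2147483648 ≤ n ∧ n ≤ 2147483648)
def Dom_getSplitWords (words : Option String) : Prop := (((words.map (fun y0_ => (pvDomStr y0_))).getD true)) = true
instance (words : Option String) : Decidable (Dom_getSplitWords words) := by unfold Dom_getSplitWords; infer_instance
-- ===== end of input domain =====

-- B is an alternative algorithm: a single-pass character tokenizer (delimiter = punctuation
-- or whitespace) instead of A's 32 successive full-string replace passes followed by split().


-- string.punctuation
def pvPunctStr : String := "!\"#$%&'()*+,-./:;<=>?@[\\]^_`{|}~"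

-- ===== PORT A =====
def getSplitWords (words : Option String) : Option (List String) :=
  match words with
  | none => none
  | some w0 =>
      -- A's first line `words.replace(string.punctuation, ' ')` discards its result: no effect
      let w := pvPunctStr.toList.foldl (fun w i => PySem.Str.replace w (String.ofList [i]) " ") w0
      some (PySem.Str.split₀ w)

-- ===== PORT B =====
def pvIsDelim (c : Char) : Bool := pvPunctStr.toList.contains c || PySem.Chars.isspace c

-- the `for c in words` loop of Source B (result/cur kept reversed, as usual for an append loop)
def pvTokGo : List Char → List Char → List (List Char) → List (List Char)
  | [], cur, acc => if cur.isEmpty then acc.reverse else (cur.reverse :: acc).reverse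
  | c :: rest, cur, acc =>
      if pvIsDelim c then
        (if cur.isEmpty then pvTokGo rest [] acc else pvTokGo rest [] (cur.reverse :: acc))
      else pvTokGo rest (c :: cur) acc

def getSplitWords_alt (words : Option String) : Option (List String) :=
  match words with
  | none => none
  | some s => some ((pvTokGo s.toList [] []).map String.ofList)

-- ===== PRECONDITION & SPEC =====
def Spec_getSplitWords (words : Option String) (out : Option (List String)) : Prop := out = getSplitWords_alt words
instance (words : Option String) (out : Option (List String)) : Decidable (Spec_getSplitWords words out) := by unfold Spec_getSplitWords; infer_instance

-- ===== CLAIM (what is proved, stated in full; the proofs are below) =====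
def Claim_equal_getSplitWords : Prop := ∀ (words : Option String), Dom_getSplitWords words → Spec_getSplitWords words (getSplitWords words)

-- ===== LEMMAS AND PROOFS =====

-- proof-side name for "blank out punctuation"
def pvBlank (c : Char) : Char := if pvPunctStr.toList.contains c then ' ' else c

-- replacing a single character a by b is a map
theorem pv_replaceGo_single (a b : Char) :
    ∀ (l : List Char) (fuel : Nat) (acc : List Char), l.length ≤ fuel →
      PySem.Chars.replace.go [a] [b] fuel l acc
        = acc.reverse ++ l.map (fun c => if c = a then b else c) := by
  intro l
  induction l with
  | nil =>
      intro fuel acc _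
      cases fuel <;> simp [PySem.Chars.replace.go]
  | cons c t ih =>
      intro fuel acc h
      cases fuel with
      | zero => simp at h
      | succ fuel =>
          by_cases hc : c = a
          · subst hc
            have hpre : [c].isPrefixOf (c :: t) = true := by simp [List.isPrefixOf]
            simp only [PySem.Chars.replace.go, hpre, if_true]
            rw [show List.drop [c].length (c :: t) = t from rfl,
                ih fuel _ (by simpa using Nat.le_of_succ_le_succ h)]
            simp
          · have hpre : [a].isPrefixOf (c :: t) = false := by
              simp [List.isPrefixOf]; exact fun h' => (hc h'.symm).elim
            simp only [PySem.Chars.replace.go, hpre]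
            rw [ih fuel _ (by simpa using Nat.le_of_succ_le_succ h)]
            simp [hc]

theorem pv_replace_single (a b : Char) (l : List Char) :
    PySem.Chars.replace l [a] [b] = l.map (fun c => if c = a then b else c) := by
  simp only [PySem.Chars.replace]
  rw [if_neg (by simp)]
  simpa using pv_replaceGo_single a b l l.length [] (le_refl _)

-- the whole replace loop is one map over the characters
theorem pv_foldl_replace_map' (ps : List Char) :
    ∀ (l : List Char),
      ps.foldl (fun w c => PySem.Chars.replace w [c] [' ']) l
        = l.map (fun c => if ps.contains c then ' ' else c) := by
  induction ps with
  | nil => intro l; simp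
  | cons p ps ih =>
      intro l
      simp only [List.foldl_cons]
      rw [pv_replace_single, ih, List.map_map]
      apply List.map_congr_left
      intro c _
      by_cases hc : c = p
      · subst hc; simp
      · simp [Function.comp, hc]

theorem pv_foldl_replace_map (l : List Char) :
    pvPunctStr.toList.foldl (fun w c => PySem.Chars.replace w [c] [' ']) l = l.map pvBlank := by
  rw [pv_foldl_replace_map' pvPunctStr.toList l]
  apply List.map_congr_left
  intro c _
  simp [pvBlank]

-- Str-level foldl reduced to Chars-level foldl
theorem pv_foldl_replace_toList (ps : List Char) :
    ∀ (s : String),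
      (ps.foldl (fun w i => PySem.Str.replace w (String.ofList [i]) " ") s).toList
        = ps.foldl (fun w c => PySem.Chars.replace w [c] [' ']) s.toList := by
  induction ps with
  | nil => intro s; rfl
  | cons p ps ih =>
      intro s
      simp only [List.foldl_cons]
      rw [ih]
      congr 1
      simp [PySem.Str.toList_replace]

-- split₀'s scanner on the punctuation-blanked string = B's tokenizer on the original
theorem pv_go_eq_tokGo :
    ∀ (cs cur : List Char) (acc : List (List Char)),
      PySem.Chars.split₀.go (cs.map pvBlank) cur acc = pvTokGo cs cur acc := by
  intro cs
  induction cs with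
  | nil => intro cur acc; rfl
  | cons c rest ih =>
      intro cur acc
      rw [List.map_cons]
      by_cases hp : pvPunctStr.toList.contains c = true
      · have hb : pvBlank c = ' ' := by rw [pvBlank, if_pos hp]
        have hd : pvIsDelim c = true := by rw [pvIsDelim, hp, Bool.true_or]
        rw [hb]
        show (if PySem.Chars.isspace ' ' = true then
                if cur.isEmpty = true then PySem.Chars.split₀.go (rest.map pvBlank) [] acc
                else PySem.Chars.split₀.go (rest.map pvBlank) [] (cur.reverse :: acc)
              else PySem.Chars.split₀.go (rest.map pvBlank) (' ' :: cur) acc) = _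
        rw [if_pos (show PySem.Chars.isspace ' ' = true from by decide)]
        show _ = (if pvIsDelim c = true then
                    if cur.isEmpty = true then pvTokGo rest [] acc
                    else pvTokGo rest [] (cur.reverse :: acc)
                  else pvTokGo rest (c :: cur) acc)
        rw [if_pos hd]
        by_cases hc : cur.isEmpty = true
        · rw [if_pos hc, if_pos hc, ih]
        · rw [if_neg hc, if_neg hc, ih]
      · have hp' : pvPunctStr.toList.contains c = false := by simpa using hp
        have hb : pvBlank c = c := by rw [pvBlank, hp']; rfl
        rw [hb]
        show (if PySem.Chars.isspace c = true then
                if cur.isEmpty = true then PySem.Chars.split₀.go (rest.map pvBlank) [] acc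
                else PySem.Chars.split₀.go (rest.map pvBlank) [] (cur.reverse :: acc)
              else PySem.Chars.split₀.go (rest.map pvBlank) (c :: cur) acc) = _
        show _ = (if pvIsDelim c = true then
                    if cur.isEmpty = true then pvTokGo rest [] acc
                    else pvTokGo rest [] (cur.reverse :: acc)
                  else pvTokGo rest (c :: cur) acc)
        have hdi : pvIsDelim c = PySem.Chars.isspace c := by
          rw [pvIsDelim, hp', Bool.false_or]
        rw [hdi]
        by_cases hs : PySem.Chars.isspace c = true
        · rw [if_pos hs, if_pos hs]
          by_cases hc : cur.isEmpty = true
          · rw [if_pos hc, if_pos hc, ih]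
          · rw [if_neg hc, if_neg hc, ih]
        · rw [if_neg hs, if_neg hs, ih]

-- ===== VERDICT (by name: the statement is the Claim_ definition above) =====
theorem getSplitWords_spec : Claim_equal_getSplitWords := by
  unfold Claim_equal_getSplitWords
  intro words _
  unfold Spec_getSplitWords getSplitWords getSplitWords_alt
  cases words with
  | none => rfl
  | some s =>
      simp only
      rw [PySem.Str.split₀]
      rw [show (pvPunctStr.toList.foldl (fun w i => PySem.Str.replace w (String.ofList [i]) " ") s).toList
            = s.toList.map pvBlank from by rw [pv_foldl_replace_toList, pv_foldl_replace_map]]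
      rw [show PySem.Chars.split₀ (s.toList.map pvBlank) = pvTokGo s.toList [] []
            from pv_go_eq_tokGo s.toList [] []]
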